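-- pv_equiv track=rewrite | github.com/Cesarmosqueira/Quoridor-AI | aux_funcs.py | valid_block
-- ===== SOURCE A (Python) =====
-- def valid_block(board, r, c):
--     board[r][c] = '#'
--     dx = [1,-1,0,0]
--     dy = [0,0,1,-1]
--     n, m = len(board), len(board[0])
--
--     vis = [[False for i in range(m)] for j in range(n)]
--
--     def valid(row, col):
--         return (row >= 0) and (row < n) and (col >= 0) and (col < m) \
--             and (board[row][col] != '#') and (not vis[row][col])
--
--     def dfs(row, col):
--         vis[row][col] = True
--         for i in range(4):
--             nx = row + dx[i]
--             ny = col + dy[i]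
--             if valid(nx, ny):
--                 dfs(nx, ny)
--
--     rooms = 0
--
--     for i in range(n):
--         for j in range(m):
--             if (board[i][j] != '#') and (not vis[i][j]):
--                 rooms += 1
--                 dfs(i, j)
--
--     board[r][c] = ' '
--     return rooms == 1
-- ===== SOURCE B (Python) =====
-- def valid_block(board, r, c):
--     # Return-value equivalent to A (and performs the same in-place mutation:
--     # board[r][c] is set to '#' during the check and restored to ' ').
--     board[r][c] = '#'
--     n, m = len(board), len(board[0])
--     # first free cell in row-major order (the flood seed)
--     seed = None
--     for i in range(n):
--         for j in range(m):
--             if seed is None and board[i][j] != '#':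
--                 seed = (i, j)
--     ok = False
--     if seed is not None:
--         vis = [[False] * m for _ in range(n)]
--         stack = [seed]
--         while stack:
--             row, col = stack.pop()
--             if 0 <= row < n and 0 <= col < m and board[row][col] != '#' and not vis[row][col]:
--                 vis[row][col] = True
--                 stack.extend([(row, col - 1), (row, col + 1), (row - 1, col), (row + 1, col)])
--         ok = True
--         for i in range(n):
--             for j in range(m):
--                 if board[i][j] != '#' and not vis[i][j]:
--                     ok = False
--     board[r][c] = ' '
--     return ok
-- ===== Notes on version B (the rewrite author's own statement) =====
-- stated objective: alternative
-- what changed: Replaces A's recursive per-component DFS counting (run a recursive dfs from every unvisited free cell, count components, return rooms==1) by a single explicit-stack flood fill from the first free cell in row-major order followed by a check that every free cell was reached.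
import Mathlib
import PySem

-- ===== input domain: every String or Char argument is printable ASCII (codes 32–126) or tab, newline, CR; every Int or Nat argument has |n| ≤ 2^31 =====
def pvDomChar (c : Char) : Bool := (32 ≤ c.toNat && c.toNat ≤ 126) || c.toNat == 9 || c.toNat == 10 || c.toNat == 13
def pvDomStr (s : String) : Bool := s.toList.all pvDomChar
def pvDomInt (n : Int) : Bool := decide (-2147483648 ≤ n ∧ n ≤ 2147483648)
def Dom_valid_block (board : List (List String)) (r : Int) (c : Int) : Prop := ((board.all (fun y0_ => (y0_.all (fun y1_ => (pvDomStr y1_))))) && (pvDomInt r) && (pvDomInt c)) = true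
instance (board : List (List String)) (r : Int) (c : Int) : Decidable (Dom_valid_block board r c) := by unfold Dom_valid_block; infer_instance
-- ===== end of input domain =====

-- B replaces A's recursive per-component DFS count by one explicit-stack flood fill from the
-- first free cell plus a full-coverage check (return values equal; both Pythons mutate `board`
-- identically in place: the blocked cell ends up ' ').

-- ===== PORT A =====
-- shared primitive accessors (the identical Python expressions occur in both programs)
-- board[r][c] = '#' (negative indices wrap; Pre_ keeps them inside Python's index range)
def vbBlocked (board : List (List String)) (r : Int) (c : Int) : List (List String) :=
  let ri := (if r < 0 then r + board.length else r).toNat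
  let row := board.getD ri []
  let ci := (if c < 0 then c + row.length else c).toNat
  board.set ri (row.set ci "#")

-- board[i][j] for 0 ≤ i, j (exact on Pre_: every read has j < len(board[i]))
def vbCell (b : List (List String)) (i j : Nat) : String := (b.getD i []).getD j ""
-- vis[i][j] (exact: vis is rectangular n×m and reads are range-guarded)
def vbGet2 (vis : List (List Bool)) (i j : Nat) : Bool := (vis.getD i []).getD j false
-- vis[i][j] = True
def vbSet2 (vis : List (List Bool)) (i j : Nat) : List (List Bool) :=
  vis.modify i (fun row => row.set j true)

def vbDirs : List (Int × Int) := [(1, 0), (-1, 0), (0, 1), (0, -1)]  -- zip(dx, dy)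

-- A's valid(row, col)
def vbValid (b : List (List String)) (n m : Nat) (vis : List (List Bool)) (row col : Int) : Bool :=
  decide (0 ≤ row) && decide (row < (n : Int)) && decide (0 ≤ col) && decide (col < (m : Int)) &&
    (vbCell b row.toNat col.toNat != "#") && !(vbGet2 vis row.toNat col.toNat)

-- A's dfs; the fuel argument only makes the recursion structural — with the fuel the caller
-- passes (n*m+1) it never runs out, since every call first marks an unvisited cell.
def vbDfs (b : List (List String)) (n m : Nat) : Nat → List (List Bool) → Int → Int → List (List Bool)
  | 0, vis, _, _ => vis
  | fuel + 1, vis, row, col =>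
    vbDirs.foldl
      (fun v d =>
        if vbValid b n m v (row + d.1) (col + d.2) then vbDfs b n m fuel v (row + d.1) (col + d.2)
        else v)
      (vbSet2 vis row.toNat col.toNat)

-- the body of A's double scan loop
def vbScanStep (b : List (List String)) (n m : Nat) (st : Nat × List (List Bool)) (i j : Nat) :
    Nat × List (List Bool) :=
  if (vbCell b i j != "#") && !(vbGet2 st.2 i j) then
    (st.1 + 1, vbDfs b n m (n * m + 1) st.2 (i : Int) (j : Int))
  else st

def valid_block (board : List (List String)) (r : Int) (c : Int) : Bool :=
  let b := vbBlocked board r c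
  let n := b.length
  let m := (b.headD []).length
  let st :=
    (List.range n).foldl
      (fun st i => (List.range m).foldl (fun st j => vbScanStep b n m st i j) st)
      (0, List.replicate n (List.replicate m false))
  st.1 == 1

-- ===== PORT B =====
-- number of unvisited cells (termination measure for the flood loop)
def vbCountFalse (vis : List (List Bool)) : Nat := (vis.map (fun row => row.count false)).sum

-- B's loop condition; Python's `not vis[row][col]` is ported as the total lookup
-- `= some false` ("the entry exists and is False"): on the rectangular n×m vis the
-- port builds, the entry always exists once the range checks hold, so this is exact.
def vbValidB (b : List (List String)) (n m : Nat) (vis : List (List Bool)) (row col : Int) : Bool :=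
  decide (0 ≤ row) && decide (row < (n : Int)) && decide (0 ≤ col) && decide (col < (m : Int)) &&
    (vbCell b row.toNat col.toNat != "#") &&
    ((vis[row.toNat]?.bind fun rw => rw[col.toNat]?) == some false)

-- termination lemmas for vbFlood (cited in decreasing_by)
lemma vbCount_row_set_lt (row : List Bool) (j : Nat) (h : row[j]? = some false) :
    (row.set j true).count false < row.count false := by
  have hj : j < row.length := by
    by_contra hc
    rw [List.getElem?_eq_none (Nat.le_of_not_lt hc)] at h
    simp at h
  have he : row[j] = false := by
    rw [List.getElem?_eq_getElem hj] at h
    exact Option.some.inj h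
  have hmem : false ∈ row := he ▸ List.getElem_mem hj
  have hpos : 0 < row.count false := List.count_pos_iff.mpr hmem
  rw [List.count_set hj]
  simp [he]
  omega

lemma vbCountFalse_set2_lt (vis : List (List Bool)) (i j : Nat)
    (h : (vis[i]?.bind fun rw => rw[j]?) = some false) :
    vbCountFalse (vbSet2 vis i j) < vbCountFalse vis := by
  induction vis generalizing i with
  | nil => simp at h
  | cons r0 rest ih =>
    cases i with
    | zero =>
      simp at h
      have h0 : (r0 :: rest).modify 0 (fun row => row.set j true) = (r0.set j true) :: rest := by
        simp [List.modify]
      simp only [vbSet2, h0, vbCountFalse, List.map_cons, List.sum_cons]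
      have := vbCount_row_set_lt r0 j h
      omega
    | succ i =>
      simp only [List.getElem?_cons_succ] at h
      have hs : (r0 :: rest).modify (i + 1) (fun row => row.set j true) =
          r0 :: rest.modify i (fun row => row.set j true) := by
        simp [List.modify]
      simp only [vbSet2, hs, vbCountFalse, List.map_cons, List.sum_cons]
      have := ih i h
      simp only [vbSet2, vbCountFalse] at this
      omega

lemma vbValidB_entry {b : List (List String)} {n m : Nat} {vis : List (List Bool)} {row col : Int}
    (h : vbValidB b n m vis row col = true) :
    (vis[row.toNat]?.bind fun rw => rw[col.toNat]?) = some false := by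
  simp only [vbValidB, Bool.and_eq_true, beq_iff_eq] at h
  exact h.2

def vbFlood (b : List (List String)) (n m : Nat) (vis : List (List Bool))
    (stack : List (Int × Int)) : List (List Bool) :=
  match stack with
  | [] => vis
  | (row, col) :: s =>
    if h : vbValidB b n m vis row col = true then
      vbFlood b n m (vbSet2 vis row.toNat col.toNat)
        ((row + 1, col) :: (row - 1, col) :: (row, col + 1) :: (row, col - 1) :: s)
    else vbFlood b n m vis s
termination_by (vbCountFalse vis, stack.length)
decreasing_by
  · exact Prod.Lex.left _ _ (vbCountFalse_set2_lt vis row.toNat col.toNat (vbValidB_entry h))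
  · exact Prod.Lex.right _ (Nat.lt_succ_self _)

-- the body of B's seed-search loop
def vbSeedStep (b : List (List String)) (acc : Option (Nat × Nat)) (i j : Nat) :
    Option (Nat × Nat) :=
  if acc.isNone && (vbCell b i j != "#") then some (i, j) else acc

-- the body of B's coverage-check loop
def vbAllStep (b : List (List String)) (vis : List (List Bool)) (ok : Bool) (i j : Nat) : Bool :=
  if (vbCell b i j != "#") && !(vbGet2 vis i j) then false else ok

-- B's coverage check: every free cell was reached by the flood
def vbCheckAll (b : List (List String)) (n m : Nat) (vis : List (List Bool)) : Bool :=
  (List.range n).foldl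
    (fun ok i => (List.range m).foldl (fun ok j => vbAllStep b vis ok i j) ok) true

def valid_block_alt (board : List (List String)) (r : Int) (c : Int) : Bool :=
  let b := vbBlocked board r c
  let n := b.length
  let m := (b.headD []).length
  let seed :=
    (List.range n).foldl
      (fun acc i => (List.range m).foldl (fun acc j => vbSeedStep b acc i j) acc) none
  match seed with
  | none => false
  | some s =>
    vbCheckAll b n m
      (vbFlood b n m (List.replicate n (List.replicate m false)) [((s.1 : Int), (s.2 : Int))])

-- ===== PRECONDITION & SPEC =====
-- Pre_ excludes exactly the inputs on which A raises an IndexError: an empty board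
-- (len(board[0])), r outside Python's index range for board, c outside the index range of the
-- row board[r] being blocked, and a board with some row shorter than row 0 (the scan reads
-- board[i][j] for every j < len(board[0])). Rows longer than row 0 are admitted.
def Pre_valid_block (board : List (List String)) (r : Int) (c : Int) : Prop :=
  board ≠ [] ∧
  (∀ row ∈ board, (board.headD []).length ≤ row.length) ∧
  -(board.length : Int) ≤ r ∧ r < (board.length : Int) ∧
  -(((board.getD (if r < 0 then r + board.length else r).toNat []).length : Int)) ≤ c ∧
  c < ((board.getD (if r < 0 then r + board.length else r).toNat []).length : Int)

instance (board : List (List String)) (r : Int) (c : Int) :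
    Decidable (Pre_valid_block board r c) := by unfold Pre_valid_block; infer_instance

def pvWitness_valid_block : List (List String) × Int × Int := ([[" ", " "], [" ", " "]], 0, 0)

def Spec_valid_block (board : List (List String)) (r : Int) (c : Int) (out : Bool) : Prop :=
  out = valid_block_alt board r c
instance (board : List (List String)) (r : Int) (c : Int) (out : Bool) :
    Decidable (Spec_valid_block board r c out) := by unfold Spec_valid_block; infer_instance

-- ===== CLAIM (what is proved, stated in full; the proofs are below) =====
def Claim_equal_valid_block : Prop := ∀ (board : List (List String)) (r : Int) (c : Int), Dom_valid_block board r c → Pre_valid_block board r c → Spec_valid_block board r c (valid_block board r c)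

-- ===== LEMMAS AND PROOFS =====

-- row-major list of all cell positions
def vbP (n m : Nat) : List (Nat × Nat) :=
  (List.range n).flatMap fun i => (List.range m).map fun j => (i, j)

-- rectangularity of a visited matrix
def vbShape (n m : Nat) (vis : List (List Bool)) : Prop :=
  vis.length = n ∧ ∀ i, i < n → (vis[i]?.getD []).length = m

-- bundled step relation: preserves shape, does not increase the unvisited count,
-- and never unmarks a visited cell
def vbR (n m : Nat) (v w : List (List Bool)) : Prop :=
  (vbShape n m v → vbShape n m w) ∧ vbCountFalse w ≤ vbCountFalse v ∧
    (∀ x y, vbGet2 v x y = true → vbGet2 w x y = true)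

lemma vbR_refl (n m : Nat) (v : List (List Bool)) : vbR n m v v :=
  ⟨id, le_rfl, fun _ _ h => h⟩

lemma vbR_trans {n m : Nat} {u v w : List (List Bool)} (h1 : vbR n m u v) (h2 : vbR n m v w) :
    vbR n m u w :=
  ⟨h2.1 ∘ h1.1, le_trans h2.2.1 h1.2.1, fun x y h => h2.2.2 x y (h1.2.2 x y h)⟩

lemma vbCount_row_set_le (row : List Bool) (j : Nat) :
    (row.set j true).count false ≤ row.count false := by
  by_cases hj : j < row.length
  · rw [List.count_set hj]
    split <;> simp
  · rw [List.set_eq_of_length_le (Nat.le_of_not_lt hj)]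

lemma vbCountFalse_set2_le (vis : List (List Bool)) (i j : Nat) :
    vbCountFalse (vbSet2 vis i j) ≤ vbCountFalse vis := by
  induction vis generalizing i with
  | nil => simp [vbSet2, vbCountFalse]
  | cons r0 rest ih =>
    cases i with
    | zero =>
      have h0 : (r0 :: rest).modify 0 (fun row => row.set j true) = (r0.set j true) :: rest := by
        simp [List.modify]
      simp only [vbSet2, h0, vbCountFalse, List.map_cons, List.sum_cons]
      have := vbCount_row_set_le r0 j
      omega
    | succ i =>
      have hs : (r0 :: rest).modify (i + 1) (fun row => row.set j true) =
          r0 :: rest.modify i (fun row => row.set j true) := by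
        simp [List.modify]
      simp only [vbSet2, hs, vbCountFalse, List.map_cons, List.sum_cons]
      have := ih i
      simp only [vbSet2, vbCountFalse] at this
      omega

lemma vbGet2_eq (vis : List (List Bool)) (i j : Nat) :
    vbGet2 vis i j = ((vis[i]?.getD [])[j]?.getD false) := by
  simp [vbGet2, List.getD_eq_getElem?_getD]

lemma vbShape_set2 {n m : Nat} {vis : List (List Bool)} (h : vbShape n m vis) (i j : Nat) :
    vbShape n m (vbSet2 vis i j) := by
  obtain ⟨hlen, hrow⟩ := h
  constructor
  · simpa [vbSet2] using hlen
  · intro k hk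
    have hk' : k < vis.length := by omega
    have hv : vis[k]? = some vis[k] := List.getElem?_eq_getElem hk'
    have hr := hrow k hk
    rw [hv] at hr
    simp only [Option.getD_some] at hr
    simp only [vbSet2, List.getElem?_modify, hv]
    by_cases hik : i = k
    · simp [hik, List.length_set, hr]
    · simp [hik, hr]

lemma vbGet2_set2_mono {vis : List (List Bool)} {a c : Nat} (i j : Nat)
    (h : vbGet2 vis a c = true) : vbGet2 (vbSet2 vis i j) a c = true := by
  rw [vbGet2_eq] at h ⊢
  simp only [vbSet2, List.getElem?_modify]
  cases hv : vis[a]? with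
  | none => rw [hv] at h; simp at h
  | some row =>
    rw [hv] at h
    simp only [Option.getD_some] at h
    by_cases hia : i = a
    · by_cases hjc : j = c
      · subst hjc
        have hlt : j < row.length := by
          by_contra hcc
          rw [List.getElem?_eq_none (Nat.le_of_not_lt hcc)] at h
          simp at h
        simp [hia, List.getElem?_set_self hlt]
      · simp [hia, List.getElem?_set_ne hjc, h]
    · simp [hia, h]

lemma vbR_set2 (n m : Nat) (vis : List (List Bool)) (i j : Nat) :
    vbR n m vis (vbSet2 vis i j) :=
  ⟨fun h => vbShape_set2 h i j, vbCountFalse_set2_le vis i j,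
    fun _ _ h => vbGet2_set2_mono i j h⟩

lemma vbR_foldl {α : Type} (n m : Nat) (step : List (List Bool) → α → List (List Bool))
    (hstep : ∀ v x, vbR n m v (step v x)) :
    ∀ (l : List α) (v : List (List Bool)), vbR n m v (l.foldl step v) := by
  intro l
  induction l with
  | nil => intro v; exact vbR_refl n m v
  | cons x xs ih => intro v; exact vbR_trans (hstep v x) (ih (step v x))

lemma vbR_dfs (b : List (List String)) (n m : Nat) :
    ∀ (fuel : Nat) (vis : List (List Bool)) (row col : Int),
      vbR n m vis (vbDfs b n m fuel vis row col) := by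
  intro fuel
  induction fuel with
  | zero => intro vis row col; exact vbR_refl n m vis
  | succ fuel ih =>
    intro vis row col
    refine vbR_trans (vbR_set2 n m vis row.toNat col.toNat) ?_
    refine vbR_foldl n m _ ?_ vbDirs _
    intro v d
    by_cases h : vbValid b n m v (row + d.1) (col + d.2) = true
    · simpa [h] using ih v (row + d.1) (col + d.2)
    · simpa [h] using vbR_refl n m v

def vbStepG (b : List (List String)) (n m f : Nat) (v : List (List Bool)) (q : Int × Int) :
    List (List Bool) :=
  if vbValid b n m v q.1 q.2 then vbDfs b n m f v q.1 q.2 else v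

lemma vbR_stepG (b : List (List String)) (n m f : Nat) :
    ∀ (v : List (List Bool)) (q : Int × Int), vbR n m v (vbStepG b n m f v q) := by
  intro v q
  unfold vbStepG
  split
  · exact vbR_dfs b n m f v q.1 q.2
  · exact vbR_refl n m v

-- under rectangularity the two loop conditions coincide
lemma vbValidB_eq_vbValid {n m : Nat} {vis : List (List Bool)} (b : List (List String))
    (hs : vbShape n m vis) (row col : Int) :
    vbValidB b n m vis row col = vbValid b n m vis row col := by
  by_cases h1 : (0 : Int) ≤ row
  case neg => simp [vbValidB, vbValid, h1]
  by_cases h2 : row < (n : Int)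
  case neg => simp [vbValidB, vbValid, h2]
  by_cases h3 : (0 : Int) ≤ col
  case neg => simp [vbValidB, vbValid, h3]
  by_cases h4 : col < (m : Int)
  case neg => simp [vbValidB, vbValid, h4]
  have hlen : vis.length = n := hs.1
  have hrn : row.toNat < n := by omega
  have hcm : col.toNat < m := by omega
  have hrl : row.toNat < vis.length := by omega
  have hv : vis[row.toNat]? = some vis[row.toNat] := List.getElem?_eq_getElem hrl
  have hrow := hs.2 row.toNat hrn
  rw [hv] at hrow
  simp only [Option.getD_some] at hrow
  have hcl : col.toNat < vis[row.toNat].length := by omega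
  have hcv : vis[row.toNat][col.toNat]? = some vis[row.toNat][col.toNat] :=
    List.getElem?_eq_getElem hcl
  have key : ((vis[row.toNat]?.bind fun rw => rw[col.toNat]?) == some false) =
      !(vbGet2 vis row.toNat col.toNat) := by
    rw [vbGet2_eq, hv]
    cases hx : vis[row.toNat][col.toNat] <;> simp [hcv, hx]
  unfold vbValidB vbValid
  rw [key]

-- one-step unfoldings of the flood loop
lemma vbFlood_nil (b : List (List String)) (n m : Nat) (vis : List (List Bool)) :
    vbFlood b n m vis [] = vis := by rw [vbFlood]

lemma vbFlood_cons_pos {b : List (List String)} {n m : Nat} {vis : List (List Bool)}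
    {row col : Int} (s : List (Int × Int)) (h : vbValidB b n m vis row col = true) :
    vbFlood b n m vis ((row, col) :: s) =
      vbFlood b n m (vbSet2 vis row.toNat col.toNat)
        ((row + 1, col) :: (row - 1, col) :: (row, col + 1) :: (row, col - 1) :: s) := by
  rw [vbFlood]
  simp [h]

lemma vbFlood_cons_neg {b : List (List String)} {n m : Nat} {vis : List (List Bool)}
    {row col : Int} (s : List (Int × Int)) (h : vbValidB b n m vis row col = false) :
    vbFlood b n m vis ((row, col) :: s) = vbFlood b n m vis s := by
  rw [vbFlood]
  simp [h]

-- THE SIMULATION: the explicit-stack flood equals folding A's dfs over the pending stack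
lemma vbFlood_eq_foldG (b : List (List String)) (n m : Nat) :
    ∀ (k : Nat) (qs : List (Int × Int)) (vis : List (List Bool)) (s : List (Int × Int)) (f : Nat),
      vbCountFalse vis ≤ k → vbShape n m vis → vbCountFalse vis < f →
      vbFlood b n m vis (qs ++ s) = vbFlood b n m (qs.foldl (vbStepG b n m f) vis) s := by
  intro k
  induction k with
  | zero =>
    intro qs
    induction qs with
    | nil => intro vis s f _ _ _; simp
    | cons q qs ih =>
      intro vis s f hk hs hf
      obtain ⟨row, col⟩ := q
      cases hvB : vbValidB b n m vis row col with
      | true =>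
        have := vbCountFalse_set2_lt vis row.toNat col.toNat (vbValidB_entry hvB)
        omega
      | false =>
        have hvA : vbValid b n m vis row col = false := by
          rw [← vbValidB_eq_vbValid b hs]; exact hvB
        rw [List.cons_append, vbFlood_cons_neg _ hvB, List.foldl_cons]
        have hstep : vbStepG b n m f vis (row, col) = vis := by simp [vbStepG, hvA]
        rw [hstep]
        exact ih vis s f hk hs hf
  | succ k ihk =>
    intro qs
    induction qs with
    | nil => intro vis s f _ _ _; simp
    | cons q qs ih =>
      intro vis s f hk hs hf
      obtain ⟨row, col⟩ := q
      cases hvB : vbValidB b n m vis row col with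
      | false =>
        have hvA : vbValid b n m vis row col = false := by
          rw [← vbValidB_eq_vbValid b hs]; exact hvB
        rw [List.cons_append, vbFlood_cons_neg _ hvB, List.foldl_cons]
        have hstep : vbStepG b n m f vis (row, col) = vis := by simp [vbStepG, hvA]
        rw [hstep]
        exact ih vis s f hk hs hf
      | true =>
        have hvA : vbValid b n m vis row col = true := by
          rw [← vbValidB_eq_vbValid b hs]; exact hvB
        obtain ⟨f', rfl⟩ : ∃ f', f = f' + 1 := ⟨f - 1, by omega⟩
        have hlt : vbCountFalse (vbSet2 vis row.toNat col.toNat) < vbCountFalse vis :=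
          vbCountFalse_set2_lt vis _ _ (vbValidB_entry hvB)
        have hsh : vbShape n m (vbSet2 vis row.toNat col.toNat) := vbShape_set2 hs _ _
        rw [List.cons_append, vbFlood_cons_pos _ hvB]
        have hnb : ((row + 1, col) :: (row - 1, col) :: (row, col + 1) :: (row, col - 1) ::
            (qs ++ s)) = (vbDirs.map fun d => (row + d.1, col + d.2)) ++ (qs ++ s) := by
          simp [vbDirs, sub_eq_add_neg]
        rw [hnb]
        rw [ihk (vbDirs.map fun d => (row + d.1, col + d.2)) _ (qs ++ s) f'
          (by omega) hsh (by omega)]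
        have hdfs : (vbDirs.map fun d => (row + d.1, col + d.2)).foldl (vbStepG b n m f')
            (vbSet2 vis row.toNat col.toNat) = vbDfs b n m (f' + 1) vis row col := by
          rw [List.foldl_map]; rfl
        rw [hdfs]
        have hcle : vbCountFalse (vbDfs b n m (f' + 1) vis row col) ≤
            vbCountFalse (vbSet2 vis row.toNat col.toNat) := by
          rw [← hdfs]
          exact (vbR_foldl n m _ (vbR_stepG b n m f') _ _).2.1
        have hshp : vbShape n m (vbDfs b n m (f' + 1) vis row col) :=
          (vbR_dfs b n m (f' + 1) vis row col).1 hs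
        rw [List.foldl_cons]
        have hstep : vbStepG b n m (f' + 1) vis (row, col) = vbDfs b n m (f' + 1) vis row col := by
          simp [vbStepG, hvA]
        rw [hstep]
        exact ih (vbDfs b n m (f' + 1) vis row col) s (f' + 1) (by omega) hshp (by omega)

-- A's scan: the room counter never decreases
lemma vbScan_rooms_mono (b : List (List String)) (n m : Nat) :
    ∀ (ps : List (Nat × Nat)) (st : Nat × List (List Bool)),
      st.1 ≤ ((ps.foldl (fun st q => vbScanStep b n m st q.1 q.2) st)).1 := by
  intro ps
  induction ps with
  | nil => intro st; simp
  | cons q qs ih =>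
    intro st
    rw [List.foldl_cons]
    refine le_trans ?_ (ih (vbScanStep b n m st q.1 q.2))
    unfold vbScanStep
    split <;> simp

-- if every free cell of ps is already visited, the scan is a no-op
lemma vbScan_noop (b : List (List String)) (n m : Nat) :
    ∀ (ps : List (Nat × Nat)) (rm : Nat) (v : List (List Bool)),
      (∀ q ∈ ps, (vbCell b q.1 q.2 != "#") = true → vbGet2 v q.1 q.2 = true) →
      ps.foldl (fun st q => vbScanStep b n m st q.1 q.2) (rm, v) = (rm, v) := by
  intro ps
  induction ps with
  | nil => intro rm v _; simp
  | cons q qs ih =>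
    intro rm v h
    rw [List.foldl_cons]
    have hstep : vbScanStep b n m (rm, v) q.1 q.2 = (rm, v) := by
      unfold vbScanStep
      have hc : ((vbCell b q.1 q.2 != "#") && !(vbGet2 v q.1 q.2)) = false := by
        by_cases hfr : (vbCell b q.1 q.2 != "#") = true
        · simp [hfr, h q (List.mem_cons_self ..) hfr]
        · simp only [Bool.not_eq_true] at hfr
          simp [hfr]
      simp [hc]
    rw [hstep]
    exact ih rm v (fun p hp => h p (List.mem_cons_of_mem q hp))

-- an unvisited free cell forces at least one more room
lemma vbScan_fires (b : List (List String)) (n m : Nat) :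
    ∀ (ps : List (Nat × Nat)) (rm : Nat) (v : List (List Bool)) (q : Nat × Nat),
      q ∈ ps → (vbCell b q.1 q.2 != "#") = true → vbGet2 v q.1 q.2 = false →
      rm + 1 ≤ ((ps.foldl (fun st q => vbScanStep b n m st q.1 q.2) (rm, v))).1 := by
  intro ps
  induction ps with
  | nil => intro rm v q hq _ _; simp at hq
  | cons p qs ih =>
    intro rm v q hq hfree hunvis
    rw [List.foldl_cons]
    by_cases hc : ((vbCell b p.1 p.2 != "#") && !(vbGet2 v p.1 p.2)) = true
    · have hstep : vbScanStep b n m (rm, v) p.1 p.2 =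
          (rm + 1, vbDfs b n m (n * m + 1) v (p.1 : Int) (p.2 : Int)) := by
        simp [vbScanStep, hc]
      rw [hstep]
      simpa using vbScan_rooms_mono b n m qs
        (rm + 1, vbDfs b n m (n * m + 1) v (p.1 : Int) (p.2 : Int))
    · have hstep : vbScanStep b n m (rm, v) p.1 p.2 = (rm, v) := by
        simp only [Bool.not_eq_true] at hc
        simp [vbScanStep, hc]
      rw [hstep]
      rcases List.mem_cons.mp hq with rfl | hq'
      · exact absurd (by simp [hfree, hunvis]) hc
      · exact ih rm v q hq' hfree hunvis

-- characterisation of B's coverage-check fold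
lemma vbAllFold_iff (b : List (List String)) (vis : List (List Bool)) :
    ∀ (ps : List (Nat × Nat)) (ok : Bool),
      (ps.foldl (fun ok q => vbAllStep b vis ok q.1 q.2) ok = true ↔
        ok = true ∧ ∀ q ∈ ps, (vbCell b q.1 q.2 != "#") = true → vbGet2 vis q.1 q.2 = true) := by
  intro ps
  induction ps with
  | nil => intro ok; simp
  | cons q qs ih =>
    intro ok
    rw [List.foldl_cons, ih]
    by_cases hc : ((vbCell b q.1 q.2 != "#") && !(vbGet2 vis q.1 q.2)) = true
    · have hstep : vbAllStep b vis ok q.1 q.2 = false := by simp [vbAllStep, hc]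
      rw [hstep]
      simp only [Bool.and_eq_true, Bool.not_eq_true'] at hc
      constructor
      · rintro ⟨h0, -⟩; exact absurd h0 (by simp)
      · rintro ⟨-, hall⟩
        have := hall q (List.mem_cons_self ..) hc.1
        rw [hc.2] at this
        exact absurd this (by simp)
    · have hstep : vbAllStep b vis ok q.1 q.2 = ok := by
        simp only [Bool.not_eq_true] at hc
        simp [vbAllStep, hc]
      rw [hstep]
      have hq : (vbCell b q.1 q.2 != "#") = true → vbGet2 vis q.1 q.2 = true := by
        intro hf
        by_contra hvv
        simp only [Bool.not_eq_true] at hvv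
        exact hc (by simp [hf, hvv])
      simp only [List.forall_mem_cons]
      tauto

-- characterisation of B's seed-search fold
lemma vbSeedFold_some (b : List (List String)) :
    ∀ (ps : List (Nat × Nat)) (x : Nat × Nat),
      ps.foldl (fun acc q => vbSeedStep b acc q.1 q.2) (some x) = some x := by
  intro ps
  induction ps with
  | nil => intro x; simp
  | cons q qs ih =>
    intro x
    rw [List.foldl_cons]
    have : vbSeedStep b (some x) q.1 q.2 = some x := by simp [vbSeedStep]
    rw [this]
    exact ih x

lemma vbSeedFold_none (b : List (List String)) :
    ∀ (ps : List (Nat × Nat)),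
      ps.foldl (fun acc q => vbSeedStep b acc q.1 q.2) none =
        ps.find? (fun q => vbCell b q.1 q.2 != "#") := by
  intro ps
  induction ps with
  | nil => simp
  | cons q qs ih =>
    rw [List.foldl_cons]
    by_cases hf : (vbCell b q.1 q.2 != "#") = true
    · have : vbSeedStep b none q.1 q.2 = some q := by simp [vbSeedStep, hf]
      rw [this, vbSeedFold_some]
      exact (List.find?_cons_of_pos (p := fun q => vbCell b q.1 q.2 != "#") (l := qs) hf).symm
    · have : vbSeedStep b none q.1 q.2 = none := by
        simp only [Bool.not_eq_true] at hf
        simp [vbSeedStep, hf]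
      rw [this, ih]
      exact (List.find?_cons_of_neg (p := fun q => vbCell b q.1 q.2 != "#") (l := qs) hf).symm

-- collapsing the two nested range loops into one fold over vbP
lemma vbNested_eq_flat {γ : Type} (n m : Nat) (g : γ → Nat → Nat → γ) (st0 : γ) :
    (List.range n).foldl (fun st i => (List.range m).foldl (fun st j => g st i j) st) st0 =
      (vbP n m).foldl (fun st q => g st q.1 q.2) st0 := by
  unfold vbP
  rw [List.foldl_flatMap]
  simp only [List.foldl_map]

lemma vbCheckAll_flat (b : List (List String)) (n m : Nat) (vis : List (List Bool)) :
    vbCheckAll b n m vis = (vbP n m).foldl (fun ok q => vbAllStep b vis ok q.1 q.2) true := by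
  unfold vbCheckAll
  rw [vbNested_eq_flat]

lemma vbMem_P {n m : Nat} {q : Nat × Nat} (h : q ∈ vbP n m) : q.1 < n ∧ q.2 < m := by
  simp only [vbP, List.mem_flatMap, List.mem_map, List.mem_range] at h
  obtain ⟨i, hi, j, hj, rfl⟩ := h
  exact ⟨hi, hj⟩

lemma vbShape_replicate (n m : Nat) : vbShape n m (List.replicate n (List.replicate m false)) := by
  constructor
  · simp
  · intro i hi
    simp [hi]

lemma vbCountFalse_replicate (n m : Nat) :
    vbCountFalse (List.replicate n (List.replicate m false)) = n * m := by
  simp [vbCountFalse, List.map_replicate, List.sum_replicate, smul_eq_mul]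

lemma vbGet2_replicate (n m i j : Nat) :
    vbGet2 (List.replicate n (List.replicate m false)) i j = false := by
  rw [vbGet2_eq]
  by_cases hi : i < n <;> by_cases hj : j < m <;>
    simp [hi, hj]

-- splitting a list at the first match of find?
lemma vbFind_split {α : Type} (p : α → Bool) :
    ∀ (ps : List α) (x : α), ps.find? p = some x →
      ∃ l1 l2, ps = l1 ++ x :: l2 ∧ ∀ y ∈ l1, p y = false := by
  intro ps
  induction ps with
  | nil => intro x h; simp at h
  | cons a l ih =>
    intro x h
    by_cases hp : p a = true
    · rw [List.find?_cons_of_pos hp] at h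
      obtain rfl := Option.some.inj h
      exact ⟨[], l, rfl, by simp⟩
    · rw [List.find?_cons_of_neg hp] at h
      obtain ⟨l1, l2, rfl, hall⟩ := ih x h
      refine ⟨a :: l1, l2, rfl, ?_⟩
      intro y hy
      rcases List.mem_cons.mp hy with rfl | hy'
      · simpa using hp
      · exact hall y hy'

-- the seed cell itself is visited after the dfs from it
lemma vbGet2_dfs_self (b : List (List String)) (n m : Nat) (fuel : Nat)
    (vis : List (List Bool)) (hs : vbShape n m vis) (i j : Nat) (hi : i < n) (hj : j < m) :
    vbGet2 (vbDfs b n m (fuel + 1) vis (i : Int) (j : Int)) i j = true := by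
  have hlen0 : vis.length = n := hs.1
  have hil : i < vis.length := by omega
  have hv : vis[i]? = some vis[i] := List.getElem?_eq_getElem hil
  have hlen : vis[i].length = m := by
    have := hs.2 i hi
    rw [hv] at this
    simpa using this
  have hmarked : vbGet2 (vbSet2 vis i j) i j = true := by
    rw [vbGet2_eq]
    simp only [vbSet2, List.getElem?_modify, hv]
    simp [List.getElem?_set_self (show j < vis[i].length by omega)]
  rw [vbDfs]
  simp only [Int.toNat_natCast]
  refine (vbR_foldl n m _ ?_ vbDirs (vbSet2 vis i j)).2.2 i j hmarked
  intro v d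
  by_cases h : vbValid b n m v ((i : Int) + d.1) ((j : Int) + d.2) = true
  · simpa [h] using vbR_dfs b n m fuel v ((i : Int) + d.1) ((j : Int) + d.2)
  · simpa [h] using vbR_refl n m v

-- the heart of the equivalence, for an arbitrary blocked board b and dimensions n, m
lemma vbCore (b : List (List String)) (n m : Nat) :
    ((((vbP n m).foldl (fun st q => vbScanStep b n m st q.1 q.2)
        (0, List.replicate n (List.replicate m false)))).1 == 1)
    = (match (vbP n m).foldl (fun acc q => vbSeedStep b acc q.1 q.2) none with
       | none => false
       | some s =>
         vbCheckAll b n m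
           (vbFlood b n m (List.replicate n (List.replicate m false))
             [((s.1 : Int), (s.2 : Int))])) := by
  rw [vbSeedFold_none]
  cases hfind : (vbP n m).find? (fun q => vbCell b q.1 q.2 != "#") with
  | none =>
    have hall : ∀ q ∈ vbP n m, (vbCell b q.1 q.2 != "#") = true → False := by
      intro q hq hf
      exact (List.find?_eq_none.mp hfind q hq) hf
    rw [vbScan_noop b n m (vbP n m) 0 _ (fun q hq hf => absurd hf (fun h => hall q hq h))]
    rfl
  | some s =>
    dsimp only
    obtain ⟨P1, P2, hPsplit, hP1⟩ := vbFind_split _ (vbP n m) s hfind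
    have hfree : (vbCell b s.1 s.2 != "#") = true :=
      List.find?_some (p := fun q : Nat × Nat => vbCell b q.1 q.2 != "#") hfind
    obtain ⟨hs1, hs2⟩ := vbMem_P (List.mem_of_find?_eq_some hfind)
    have hshape0 := vbShape_replicate n m
    have hvalid0 : vbValid b n m (List.replicate n (List.replicate m false))
        (s.1 : Int) (s.2 : Int) = true := by
      simp [vbValid, vbGet2_replicate, hs1, hs2, hfree]
    have hV : vbFlood b n m (List.replicate n (List.replicate m false))
        [((s.1 : Int), (s.2 : Int))] =
        vbDfs b n m (n * m + 1) (List.replicate n (List.replicate m false))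
          (s.1 : Int) (s.2 : Int) := by
      have hg := vbFlood_eq_foldG b n m
        (vbCountFalse (List.replicate n (List.replicate m false)))
        [((s.1 : Int), (s.2 : Int))] (List.replicate n (List.replicate m false)) [] (n * m + 1)
        le_rfl hshape0 (by rw [vbCountFalse_replicate]; omega)
      simpa [vbStepG, hvalid0, vbFlood_nil] using hg
    set V := vbDfs b n m (n * m + 1) (List.replicate n (List.replicate m false))
      (s.1 : Int) (s.2 : Int) with hVdef
    rw [hPsplit, List.foldl_append, List.foldl_cons]
    rw [vbScan_noop b n m P1 0 _ (fun q hq hf => absurd hf (by simp [hP1 q hq]))]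
    have hstep : vbScanStep b n m (0, List.replicate n (List.replicate m false)) s.1 s.2 =
        (1, V) := by
      simp [vbScanStep, hfree, vbGet2_replicate, hVdef]
    rw [hstep, hV]
    have hseedvis : vbGet2 V s.1 s.2 = true :=
      vbGet2_dfs_self b n m (n * m) _ hshape0 s.1 s.2 hs1 hs2
    have hcov : (∀ q ∈ vbP n m, (vbCell b q.1 q.2 != "#") = true → vbGet2 V q.1 q.2 = true) ↔
        (∀ q ∈ P2, (vbCell b q.1 q.2 != "#") = true → vbGet2 V q.1 q.2 = true) := by
      constructor
      · intro h q hq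
        exact h q (by rw [hPsplit]; exact List.mem_append_right _ (List.mem_cons_of_mem _ hq))
      · intro h q hq hf
        rw [hPsplit] at hq
        rcases List.mem_append.mp hq with h1' | h2'
        · exact absurd hf (by simp [hP1 q h1'])
        · rcases List.mem_cons.mp h2' with rfl | h2''
          · exact hseedvis
          · exact h q h2'' hf
    rw [vbCheckAll_flat]
    by_cases hcv : ∀ q ∈ P2, (vbCell b q.1 q.2 != "#") = true → vbGet2 V q.1 q.2 = true
    · rw [vbScan_noop b n m P2 1 V hcv]
      have hB1 : (vbP n m).foldl (fun ok q => vbAllStep b V ok q.1 q.2) true = true :=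
        (vbAllFold_iff b V (vbP n m) true).mpr ⟨rfl, hcov.mpr hcv⟩
      rw [hB1]
      rfl
    · push Not at hcv
      obtain ⟨q, hq, hf, hnv⟩ := hcv
      simp only [Bool.not_eq_true] at hnv
      have hA2 := vbScan_fires b n m P2 1 V q hq hf hnv
      have hB2 : (vbP n m).foldl (fun ok q => vbAllStep b V ok q.1 q.2) true = false := by
        cases hx : (vbP n m).foldl (fun ok q => vbAllStep b V ok q.1 q.2) true with
        | false => rfl
        | true =>
          have := (hcov.mp ((vbAllFold_iff b V (vbP n m) true).mp hx).2) q hq hf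
          rw [hnv] at this
          exact absurd this (by simp)
      rw [hB2]
      have hne : ((P2.foldl (fun st q => vbScanStep b n m st q.1 q.2) (1, V)).1 == 1) = false := by
        simp only [beq_eq_false_iff_ne, ne_eq]
        omega
      rw [hne]

-- ===== VERDICT (by name: the statement is the Claim_ definition above) =====
theorem valid_block_spec : Claim_equal_valid_block := by
  intro board r c _ _
  show valid_block board r c = valid_block_alt board r c
  simp only [valid_block, valid_block_alt]
  rw [vbNested_eq_flat _ _ (vbScanStep (vbBlocked board r c) _ _),
    vbNested_eq_flat _ _ (vbSeedStep (vbBlocked board r c))]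
  exact vbCore (vbBlocked board r c) _ _
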